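-- pv_equiv track=rewrite | github.com/anshgupta-456/FitBudd | backend/app.py | generate_meal_suggestions
-- ===== SOURCE A (Python) =====
-- def generate_meal_suggestions(meal_type, calories, dietary_restrictions, cycle_foods):
--     """Generate meal suggestions based on meal type and restrictions"""
--     suggestions = []
--
--     if meal_type == 'breakfast':
--         base_suggestions = [
--             "Oatmeal with berries and Greek yogurt",
--             "Scrambled eggs with whole grain toast and avocado",
--             "Protein smoothie with banana and spinach",
--             "Greek yogurt parfait with granola and fruits",
--             "Whole grain pancakes with eggs"
--         ]
--         if cycle_foods:
--             if 'iron_rich' in cycle_foods: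
--                 base_suggestions.insert(0, "Spinach and egg scramble with whole grain toast")
--             if 'magnesium_rich' in cycle_foods:
--                 base_suggestions.insert(0, "Oatmeal with almonds, banana, and pumpkin seeds")
--     elif meal_type == 'lunch':
--         base_suggestions = [
--             "Grilled chicken salad with mixed vegetables",
--             "Quinoa bowl with roasted vegetables and chickpeas",
--             "Salmon with sweet potato and steamed broccoli",
--             "Lentil soup with whole grain bread",
--             "Turkey wrap with vegetables and hummus"
--         ]
--         if cycle_foods:
--             if 'iron_rich' in cycle_foods:
--                 base_suggestions.insert(0, "Lean beef stir-fry with dark leafy greens")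
--             if 'vitamin_b6' in cycle_foods:
--                 base_suggestions.insert(0, "Chicken breast with chickpeas and vegetables")
--     elif meal_type == 'dinner':
--         base_suggestions = [
--             "Baked salmon with quinoa and roasted vegetables",
--             "Grilled chicken with brown rice and steamed broccoli",
--             "Lean beef with sweet potato and green beans",
--             "Turkey meatballs with whole grain pasta and marinara",
--             "Baked cod with roasted vegetables and quinoa"
--         ]
--         if cycle_foods:
--             if 'iron_rich' in cycle_foods:
--                 base_suggestions.insert(0, "Lean beef with spinach and lentils")
--             if 'complex_carbs' in cycle_foods:
--                 base_suggestions.insert(0, "Salmon with sweet potato and quinoa")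
--     else:  # snacks
--         base_suggestions = [
--             "Greek yogurt with berries",
--             "Apple with almond butter",
--             "Mixed nuts and dried fruits",
--             "Protein bar",
--             "Hummus with vegetable sticks"
--         ]
--         if cycle_foods:
--             if 'magnesium_rich' in cycle_foods:
--                 base_suggestions.insert(0, "Dark chocolate with almonds")
--             if 'vitamin_b6' in cycle_foods:
--                 base_suggestions.insert(0, "Banana with sunflower seeds")
--
--     # Filter based on dietary restrictions
--     for restriction in dietary_restrictions:
--         if 'vegetarian' in restriction.lower():
--             base_suggestions = [s for s in base_suggestions if 'chicken' not in s.lower() and 'beef' not in s.lower() and 'turkey' not in s.lower() and 'salmon' not in s.lower() and 'cod' not in s.lower()]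
--         if 'vegan' in restriction.lower():
--             base_suggestions = [s for s in base_suggestions if 'egg' not in s.lower() and 'yogurt' not in s.lower() and 'chicken' not in s.lower() and 'beef' not in s.lower()]
--         if 'gluten' in restriction.lower():
--             base_suggestions = [s for s in base_suggestions if 'bread' not in s.lower() and 'pasta' not in s.lower() and 'wheat' not in s.lower()]
--
--     return base_suggestions[:3]  # Return top 3 suggestions
-- ===== SOURCE B (Python) =====
-- # B: a different decomposition. Instead of repeatedly re-filtering the list once per
-- # restriction, it first scans the restrictions once to build the combined banned-substring
-- # list, builds the candidate sequence (cycle additions in reverse order, then the base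
-- # list), and makes a SINGLE pass over the candidates collecting the first 3 survivors,
-- # stopping early. Correct because filtering passes compose (filter p after filter q =
-- # filter by the conjunction) and repeated identical filters are idempotent.
--
-- _MENU = {
--     'breakfast': (
--         ["Oatmeal with berries and Greek yogurt",
--          "Scrambled eggs with whole grain toast and avocado",
--          "Protein smoothie with banana and spinach",
--          "Greek yogurt parfait with granola and fruits",
--          "Whole grain pancakes with eggs"],
--         [('iron_rich', "Spinach and egg scramble with whole grain toast"),
--          ('magnesium_rich', "Oatmeal with almonds, banana, and pumpkin seeds")],
--     ),
--     'lunch': (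
--         ["Grilled chicken salad with mixed vegetables",
--          "Quinoa bowl with roasted vegetables and chickpeas",
--          "Salmon with sweet potato and steamed broccoli",
--          "Lentil soup with whole grain bread",
--          "Turkey wrap with vegetables and hummus"],
--         [('iron_rich', "Lean beef stir-fry with dark leafy greens"),
--          ('vitamin_b6', "Chicken breast with chickpeas and vegetables")],
--     ),
--     'dinner': (
--         ["Baked salmon with quinoa and roasted vegetables",
--          "Grilled chicken with brown rice and steamed broccoli",
--          "Lean beef with sweet potato and green beans",
--          "Turkey meatballs with whole grain pasta and marinara",
--          "Baked cod with roasted vegetables and quinoa"],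
--         [('iron_rich', "Lean beef with spinach and lentils"),
--          ('complex_carbs', "Salmon with sweet potato and quinoa")],
--     ),
-- }
--
-- _SNACKS = (
--     ["Greek yogurt with berries",
--      "Apple with almond butter",
--      "Mixed nuts and dried fruits",
--      "Protein bar",
--      "Hummus with vegetable sticks"],
--     [('magnesium_rich', "Dark chocolate with almonds"),
--      ('vitamin_b6', "Banana with sunflower seeds")],
-- )
--
-- _FILTERS = [
--     ('vegetarian', ['chicken', 'beef', 'turkey', 'salmon', 'cod']),
--     ('vegan', ['egg', 'yogurt', 'chicken', 'beef']),
--     ('gluten', ['bread', 'pasta', 'wheat']),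
-- ]
--
--
-- def generate_meal_suggestions(meal_type, calories, dietary_restrictions, cycle_foods):
--     """Generate meal suggestions based on meal type and restrictions (single-pass)."""
--     base, additions = _MENU.get(meal_type, _SNACKS)
--     # union of banned substrings for all activated filter groups
--     banned = []
--     for keyword, subs in _FILTERS:
--         if any(keyword in r.lower() for r in dietary_restrictions):
--             banned.extend(subs)
--     # candidates: later-inserted cycle additions come first, then the base list
--     candidates = [s for nut, s in reversed(additions) if nut in cycle_foods] + base
--     # one pass, stop as soon as three suggestions are collected
--     out = []
--     for s in candidates:
--         low = s.lower()
--         if all(b not in low for b in banned):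
--             out.append(s)
--             if len(out) == 3:
--                 break
--     return out
-- ===== Notes on version B (the rewrite author's own statement) =====
-- stated objective: alternative
-- what changed: Instead of A's staged repeated list-rebuilding (insert(0,..) mutations and one full filtering pass per restriction), B first scans the restrictions once to compute the combined banned-substring list, builds the candidate sequence up front (reversed cycle additions + base), and makes a single pass over the candidates collecting the first three survivors with early exit.
import Mathlib
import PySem

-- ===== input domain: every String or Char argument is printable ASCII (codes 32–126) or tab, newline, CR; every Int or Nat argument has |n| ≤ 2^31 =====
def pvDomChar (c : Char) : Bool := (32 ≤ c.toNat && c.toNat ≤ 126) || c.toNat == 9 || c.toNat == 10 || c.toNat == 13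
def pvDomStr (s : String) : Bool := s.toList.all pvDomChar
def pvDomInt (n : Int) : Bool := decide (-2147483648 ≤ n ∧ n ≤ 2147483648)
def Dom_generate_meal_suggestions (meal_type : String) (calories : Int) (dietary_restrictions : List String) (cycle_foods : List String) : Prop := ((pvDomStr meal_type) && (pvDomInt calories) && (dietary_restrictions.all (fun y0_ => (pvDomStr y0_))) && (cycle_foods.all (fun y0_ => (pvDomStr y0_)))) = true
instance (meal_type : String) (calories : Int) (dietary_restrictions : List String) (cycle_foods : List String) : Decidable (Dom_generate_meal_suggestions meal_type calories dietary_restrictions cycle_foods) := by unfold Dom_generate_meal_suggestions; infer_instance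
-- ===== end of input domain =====

-- B replaces A's staged rebuilding (insert(0,..) chain, one filtering pass per restriction,
-- then [:3]) by: one scan of the restrictions building the combined banned-substring list,
-- candidates assembled up front, and a single early-exit pass collecting the first three.

-- ===== PORT A =====
-- the body of A's restriction loop (one iteration: three conditional list comprehensions)
def pvAStep (bs : List String) (restriction : String) : List String :=
  let bs := if PySem.Str.isIn "vegetarian" (PySem.Str.lower restriction) then
      bs.filter (fun s => !PySem.Str.isIn "chicken" (PySem.Str.lower s) && !PySem.Str.isIn "beef" (PySem.Str.lower s) && !PySem.Str.isIn "turkey" (PySem.Str.lower s) && !PySem.Str.isIn "salmon" (PySem.Str.lower s) && !PySem.Str.isIn "cod" (PySem.Str.lower s))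
    else bs
  let bs := if PySem.Str.isIn "vegan" (PySem.Str.lower restriction) then
      bs.filter (fun s => !PySem.Str.isIn "egg" (PySem.Str.lower s) && !PySem.Str.isIn "yogurt" (PySem.Str.lower s) && !PySem.Str.isIn "chicken" (PySem.Str.lower s) && !PySem.Str.isIn "beef" (PySem.Str.lower s))
    else bs
  let bs := if PySem.Str.isIn "gluten" (PySem.Str.lower restriction) then
      bs.filter (fun s => !PySem.Str.isIn "bread" (PySem.Str.lower s) && !PySem.Str.isIn "pasta" (PySem.Str.lower s) && !PySem.Str.isIn "wheat" (PySem.Str.lower s))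
    else bs
  bs
-- literal transliteration of A: if/elif chain with insert(0,…), then a loop of three
-- conditional list comprehensions over the restrictions, then [:3]
def generate_meal_suggestions (meal_type : String) (calories : Int) (dietary_restrictions : List String) (cycle_foods : List String) : List String :=
  let _ := calories
  let base_suggestions : List String :=
    if meal_type = "breakfast" then
      let bs := ["Oatmeal with berries and Greek yogurt",
                 "Scrambled eggs with whole grain toast and avocado",
                 "Protein smoothie with banana and spinach",
                 "Greek yogurt parfait with granola and fruits",
                 "Whole grain pancakes with eggs"]
      if !cycle_foods.isEmpty then
        let bs := if cycle_foods.contains "iron_rich" then PySem.List.insert bs 0 "Spinach and egg scramble with whole grain toast" else bs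
        let bs := if cycle_foods.contains "magnesium_rich" then PySem.List.insert bs 0 "Oatmeal with almonds, banana, and pumpkin seeds" else bs
        bs
      else bs
    else if meal_type = "lunch" then
      let bs := ["Grilled chicken salad with mixed vegetables",
                 "Quinoa bowl with roasted vegetables and chickpeas",
                 "Salmon with sweet potato and steamed broccoli",
                 "Lentil soup with whole grain bread",
                 "Turkey wrap with vegetables and hummus"]
      if !cycle_foods.isEmpty then
        let bs := if cycle_foods.contains "iron_rich" then PySem.List.insert bs 0 "Lean beef stir-fry with dark leafy greens" else bs
        let bs := if cycle_foods.contains "vitamin_b6" then PySem.List.insert bs 0 "Chicken breast with chickpeas and vegetables" else bs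
        bs
      else bs
    else if meal_type = "dinner" then
      let bs := ["Baked salmon with quinoa and roasted vegetables",
                 "Grilled chicken with brown rice and steamed broccoli",
                 "Lean beef with sweet potato and green beans",
                 "Turkey meatballs with whole grain pasta and marinara",
                 "Baked cod with roasted vegetables and quinoa"]
      if !cycle_foods.isEmpty then
        let bs := if cycle_foods.contains "iron_rich" then PySem.List.insert bs 0 "Lean beef with spinach and lentils" else bs
        let bs := if cycle_foods.contains "complex_carbs" then PySem.List.insert bs 0 "Salmon with sweet potato and quinoa" else bs
        bs
      else bs
    else
      let bs := ["Greek yogurt with berries",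
                 "Apple with almond butter",
                 "Mixed nuts and dried fruits",
                 "Protein bar",
                 "Hummus with vegetable sticks"]
      if !cycle_foods.isEmpty then
        let bs := if cycle_foods.contains "magnesium_rich" then PySem.List.insert bs 0 "Dark chocolate with almonds" else bs
        let bs := if cycle_foods.contains "vitamin_b6" then PySem.List.insert bs 0 "Banana with sunflower seeds" else bs
        bs
      else bs
  let filtered := dietary_restrictions.foldl pvAStep base_suggestions
  PySem.List.slice filtered none (some 3)

-- ===== PORT B =====
-- B-side module constants (from Source B)
def pvMenu : PySem.Dict String (List String × List (String × String)) := PySem.Dict.mk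
  [("breakfast",
    (["Oatmeal with berries and Greek yogurt",
      "Scrambled eggs with whole grain toast and avocado",
      "Protein smoothie with banana and spinach",
      "Greek yogurt parfait with granola and fruits",
      "Whole grain pancakes with eggs"],
     [("iron_rich", "Spinach and egg scramble with whole grain toast"),
      ("magnesium_rich", "Oatmeal with almonds, banana, and pumpkin seeds")])),
   ("lunch",
    (["Grilled chicken salad with mixed vegetables",
      "Quinoa bowl with roasted vegetables and chickpeas",
      "Salmon with sweet potato and steamed broccoli",
      "Lentil soup with whole grain bread",
      "Turkey wrap with vegetables and hummus"],
     [("iron_rich", "Lean beef stir-fry with dark leafy greens"),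
      ("vitamin_b6", "Chicken breast with chickpeas and vegetables")])),
   ("dinner",
    (["Baked salmon with quinoa and roasted vegetables",
      "Grilled chicken with brown rice and steamed broccoli",
      "Lean beef with sweet potato and green beans",
      "Turkey meatballs with whole grain pasta and marinara",
      "Baked cod with roasted vegetables and quinoa"],
     [("iron_rich", "Lean beef with spinach and lentils"),
      ("complex_carbs", "Salmon with sweet potato and quinoa")]))]

def pvSnacksPair : List String × List (String × String) :=
  (["Greek yogurt with berries",
    "Apple with almond butter",
    "Mixed nuts and dried fruits",
    "Protein bar",
    "Hummus with vegetable sticks"],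
   [("magnesium_rich", "Dark chocolate with almonds"),
    ("vitamin_b6", "Banana with sunflower seeds")])

def pvFilters : List (String × List String) :=
  [("vegetarian", ["chicken", "beef", "turkey", "salmon", "cod"]),
   ("vegan", ["egg", "yogurt", "chicken", "beef"]),
   ("gluten", ["bread", "pasta", "wheat"])]

-- the early-exit collection loop of Source B (k = remaining slots, started at 3)
def pvCollect (banned : List String) (k : Nat) : List String → List String
  | [] => []
  | s :: rest =>
    let low := PySem.Str.lower s
    if banned.all (fun b => !PySem.Str.isIn b low) then
      if k = 1 then [s]
      else s :: pvCollect banned (k - 1) rest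
    else pvCollect banned k rest

def generate_meal_suggestions_alt (meal_type : String) (calories : Int) (dietary_restrictions : List String) (cycle_foods : List String) : List String :=
  let _ := calories
  let pair := pvMenu.getD meal_type pvSnacksPair
  let banned := pvFilters.foldl (fun acc kw =>
    if dietary_restrictions.any (fun r => PySem.Str.isIn kw.1 (PySem.Str.lower r)) then acc ++ kw.2
    else acc) []
  let candidates := (pair.2.reverse.filterMap (fun p => if cycle_foods.contains p.1 then some p.2 else none)) ++ pair.1
  pvCollect banned 3 candidates

-- ===== PRECONDITION & SPEC =====
def Spec_generate_meal_suggestions (meal_type : String) (calories : Int) (dietary_restrictions : List String) (cycle_foods : List String) (out : List String) : Prop := out = generate_meal_suggestions_alt meal_type calories dietary_restrictions cycle_foods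
instance (meal_type : String) (calories : Int) (dietary_restrictions : List String) (cycle_foods : List String) (out : List String) : Decidable (Spec_generate_meal_suggestions meal_type calories dietary_restrictions cycle_foods out) := by unfold Spec_generate_meal_suggestions; infer_instance

-- ===== CLAIM (what is proved, stated in full; the proofs are below) =====
def Claim_equal_generate_meal_suggestions : Prop := ∀ (meal_type : String) (calories : Int) (dietary_restrictions : List String) (cycle_foods : List String), Dom_generate_meal_suggestions meal_type calories dietary_restrictions cycle_foods → Spec_generate_meal_suggestions meal_type calories dietary_restrictions cycle_foods (generate_meal_suggestions meal_type calories dietary_restrictions cycle_foods)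

-- ===== LEMMAS AND PROOFS =====

-- group predicates and activation flags (proof-only abbreviations)
def pvVegOK (s : String) : Bool := !PySem.Str.isIn "chicken" (PySem.Str.lower s) && !PySem.Str.isIn "beef" (PySem.Str.lower s) && !PySem.Str.isIn "turkey" (PySem.Str.lower s) && !PySem.Str.isIn "salmon" (PySem.Str.lower s) && !PySem.Str.isIn "cod" (PySem.Str.lower s)
def pvVgnOK (s : String) : Bool := !PySem.Str.isIn "egg" (PySem.Str.lower s) && !PySem.Str.isIn "yogurt" (PySem.Str.lower s) && !PySem.Str.isIn "chicken" (PySem.Str.lower s) && !PySem.Str.isIn "beef" (PySem.Str.lower s)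
def pvGltOK (s : String) : Bool := !PySem.Str.isIn "bread" (PySem.Str.lower s) && !PySem.Str.isIn "pasta" (PySem.Str.lower s) && !PySem.Str.isIn "wheat" (PySem.Str.lower s)
def pvAct (kw : String) (drs : List String) : Bool := drs.any (fun r => PySem.Str.isIn kw (PySem.Str.lower r))
def pvPred (drs : List String) (s : String) : Bool :=
  (!pvAct "vegetarian" drs || pvVegOK s) && (!pvAct "vegan" drs || pvVgnOK s) && (!pvAct "gluten" drs || pvGltOK s)

-- one step of A's restriction loop as a single filter
theorem astep_eq (bs : List String) (r : String) :
    pvAStep bs r =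
    bs.filter (fun s => (!PySem.Str.isIn "vegetarian" (PySem.Str.lower r) || pvVegOK s) && (!PySem.Str.isIn "vegan" (PySem.Str.lower r) || pvVgnOK s) && (!PySem.Str.isIn "gluten" (PySem.Str.lower r) || pvGltOK s)) := by
  show (let bs := if PySem.Str.isIn "vegetarian" (PySem.Str.lower r) then bs.filter pvVegOK else bs
        let bs := if PySem.Str.isIn "vegan" (PySem.Str.lower r) then bs.filter pvVgnOK else bs
        let bs := if PySem.Str.isIn "gluten" (PySem.Str.lower r) then bs.filter pvGltOK else bs
        bs) = _
  cases h1 : PySem.Str.isIn "vegetarian" (PySem.Str.lower r) <;>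
  cases h2 : PySem.Str.isIn "vegan" (PySem.Str.lower r) <;>
  cases h3 : PySem.Str.isIn "gluten" (PySem.Str.lower r) <;>
  simp only [Bool.false_eq_true, if_false, if_true, List.filter_filter, Bool.not_false,
    Bool.not_true, Bool.true_or, Bool.false_or, Bool.true_and, Bool.and_true] <;>
  first
  | (apply List.filter_congr; intro s _;
     cases pvVegOK s <;> cases pvVgnOK s <;> cases pvGltOK s <;> rfl)
  | (symm; apply List.filter_eq_self.mpr; intro s _; rfl)

-- A's restriction loop is a single filter by the combined predicate
theorem aloop_eq_filter (drs : List String) (bs : List String) :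
    drs.foldl pvAStep bs = bs.filter (pvPred drs) := by
  induction drs generalizing bs with
  | nil =>
    simp only [List.foldl_nil]
    symm; apply List.filter_eq_self.mpr
    intro s _; simp [pvPred, pvAct]
  | cons r rs ih =>
    rw [List.foldl_cons, astep_eq bs r, ih, List.filter_filter]
    apply List.filter_congr
    intro s _
    simp only [pvPred, pvAct, List.any_cons]
    cases PySem.Str.isIn "vegetarian" (PySem.Str.lower r) <;>
    cases PySem.Str.isIn "vegan" (PySem.Str.lower r) <;>
    cases PySem.Str.isIn "gluten" (PySem.Str.lower r) <;>
    cases pvVegOK s <;> cases pvVgnOK s <;> cases pvGltOK s <;>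
    cases rs.any (fun rr => PySem.Str.isIn "vegetarian" (PySem.Str.lower rr)) <;>
    cases rs.any (fun rr => PySem.Str.isIn "vegan" (PySem.Str.lower rr)) <;>
    cases rs.any (fun rr => PySem.Str.isIn "gluten" (PySem.Str.lower rr)) <;> rfl

-- B's banned list gives pointwise the same predicate
theorem banned_all_eq_pred (drs : List String) (s : String) :
    (pvFilters.foldl (fun acc kw =>
        if drs.any (fun r => PySem.Str.isIn kw.1 (PySem.Str.lower r)) then acc ++ kw.2
        else acc) []).all (fun b => !PySem.Str.isIn b (PySem.Str.lower s)) = pvPred drs s := by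
  simp only [pvFilters, List.foldl_cons, List.foldl_nil, pvPred, pvAct, pvVegOK, pvVgnOK, pvGltOK]
  cases h1 : (drs.any (fun r => PySem.Str.isIn "vegetarian" (PySem.Str.lower r))) <;>
  cases h2 : (drs.any (fun r => PySem.Str.isIn "vegan" (PySem.Str.lower r))) <;>
  cases h3 : (drs.any (fun r => PySem.Str.isIn "gluten" (PySem.Str.lower r))) <;>
    simp [Bool.and_assoc]

-- the early-exit loop computes filter-then-take
theorem pvCollect_eq_take (banned : List String) (l : List String) (k : Nat) (hk : 1 <= k) :
    pvCollect banned k l = (l.filter (fun s => banned.all (fun b => !PySem.Str.isIn b (PySem.Str.lower s)))).take k := by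
  induction l generalizing k with
  | nil => simp [pvCollect]
  | cons s rest ih =>
    simp only [pvCollect, List.filter_cons]
    cases h : banned.all (fun b => !PySem.Str.isIn b (PySem.Str.lower s)) with
    | false => simp only [Bool.false_eq_true, if_false]; exact ih k hk
    | true =>
      by_cases hk1 : k = 1
      · subst hk1
        simp only [if_pos rfl, if_true]
        cases hf : List.filter (fun s => banned.all (fun b => !PySem.Str.isIn b (PySem.Str.lower s))) rest <;> rfl
      · simp only [if_true, if_neg hk1, ih (k - 1) (by omega)]
        have hk2 : k = (k - 1) + 1 := by omega
        rw [hk2]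
        rfl

-- A's base list equals B's front ++ base
theorem base_eq (meal_type : String) (cycle_foods : List String) :
    (if meal_type = "breakfast" then
      let bs := ["Oatmeal with berries and Greek yogurt",
                 "Scrambled eggs with whole grain toast and avocado",
                 "Protein smoothie with banana and spinach",
                 "Greek yogurt parfait with granola and fruits",
                 "Whole grain pancakes with eggs"]
      if !cycle_foods.isEmpty then
        let bs := if cycle_foods.contains "iron_rich" then PySem.List.insert bs 0 "Spinach and egg scramble with whole grain toast" else bs
        let bs := if cycle_foods.contains "magnesium_rich" then PySem.List.insert bs 0 "Oatmeal with almonds, banana, and pumpkin seeds" else bs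
        bs
      else bs
    else if meal_type = "lunch" then
      let bs := ["Grilled chicken salad with mixed vegetables",
                 "Quinoa bowl with roasted vegetables and chickpeas",
                 "Salmon with sweet potato and steamed broccoli",
                 "Lentil soup with whole grain bread",
                 "Turkey wrap with vegetables and hummus"]
      if !cycle_foods.isEmpty then
        let bs := if cycle_foods.contains "iron_rich" then PySem.List.insert bs 0 "Lean beef stir-fry with dark leafy greens" else bs
        let bs := if cycle_foods.contains "vitamin_b6" then PySem.List.insert bs 0 "Chicken breast with chickpeas and vegetables" else bs
        bs
      else bs
    else if meal_type = "dinner" then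
      let bs := ["Baked salmon with quinoa and roasted vegetables",
                 "Grilled chicken with brown rice and steamed broccoli",
                 "Lean beef with sweet potato and green beans",
                 "Turkey meatballs with whole grain pasta and marinara",
                 "Baked cod with roasted vegetables and quinoa"]
      if !cycle_foods.isEmpty then
        let bs := if cycle_foods.contains "iron_rich" then PySem.List.insert bs 0 "Lean beef with spinach and lentils" else bs
        let bs := if cycle_foods.contains "complex_carbs" then PySem.List.insert bs 0 "Salmon with sweet potato and quinoa" else bs
        bs
      else bs
    else
      let bs := ["Greek yogurt with berries",
                 "Apple with almond butter",
                 "Mixed nuts and dried fruits",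
                 "Protein bar",
                 "Hummus with vegetable sticks"]
      if !cycle_foods.isEmpty then
        let bs := if cycle_foods.contains "magnesium_rich" then PySem.List.insert bs 0 "Dark chocolate with almonds" else bs
        let bs := if cycle_foods.contains "vitamin_b6" then PySem.List.insert bs 0 "Banana with sunflower seeds" else bs
        bs
      else bs) =
    ((pvMenu.getD meal_type pvSnacksPair).2.reverse.filterMap
        (fun p => if cycle_foods.contains p.1 then some p.2 else none)) ++
      (pvMenu.getD meal_type pvSnacksPair).1 := by
  by_cases h1 : meal_type = "breakfast"
  · subst h1
    rcases cycle_foods with _ | ⟨x, xs⟩ <;>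
      simp [pvMenu, pvSnacksPair, PySem.Dict.getD_eq_get?_getD, PySem.Dict.get?,
        PySem.List.insert_zero, List.filterMap] <;>
      cases hi : (x :: xs).contains "iron_rich" <;>
      cases hm : (x :: xs).contains "magnesium_rich" <;> simp_all
  · by_cases h2 : meal_type = "lunch"
    · subst h2
      rcases cycle_foods with _ | ⟨x, xs⟩ <;>
        simp [pvMenu, pvSnacksPair, PySem.Dict.getD_eq_get?_getD, PySem.Dict.get?,
          PySem.List.insert_zero, List.filterMap] <;>
        cases hi : (x :: xs).contains "iron_rich" <;>
        cases hv : (x :: xs).contains "vitamin_b6" <;> simp_all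
    · by_cases h3 : meal_type = "dinner"
      · subst h3
        rcases cycle_foods with _ | ⟨x, xs⟩ <;>
          simp [pvMenu, pvSnacksPair, PySem.Dict.getD_eq_get?_getD, PySem.Dict.get?,
            PySem.List.insert_zero, List.filterMap] <;>
          cases hi : (x :: xs).contains "iron_rich" <;>
          cases hc : (x :: xs).contains "complex_carbs" <;> simp_all
      · have b1 : ("breakfast" == meal_type) = false := by simpa using Ne.symm h1
        have b2 : ("lunch" == meal_type) = false := by simpa using Ne.symm h2
        have b3 : ("dinner" == meal_type) = false := by simpa using Ne.symm h3
        rcases cycle_foods with _ | ⟨x, xs⟩ <;>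
          simp [h1, h2, h3, pvMenu, pvSnacksPair, PySem.Dict.getD_eq_get?_getD,
            PySem.Dict.get?, List.find?, b1, b2, b3, PySem.List.insert_zero, List.filterMap] <;>
          cases hm : (x :: xs).contains "magnesium_rich" <;>
          cases hv : (x :: xs).contains "vitamin_b6" <;> simp_all

-- ===== VERDICT (by name: the statement is the Claim_ definition above) =====
theorem generate_meal_suggestions_spec : Claim_equal_generate_meal_suggestions := by
  intro meal_type calories dietary_restrictions cycle_foods _
  unfold Spec_generate_meal_suggestions
  simp only [generate_meal_suggestions, generate_meal_suggestions_alt]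
  rw [base_eq meal_type cycle_foods]
  rw [aloop_eq_filter]
  rw [pvCollect_eq_take _ _ 3 (by omega)]
  rw [PySem.List.slice_to _ (by norm_num)]
  have h3 : (3:Int).toNat = 3 := rfl
  rw [h3]
  congr 1
  apply List.filter_congr
  intro s _
  rw [banned_all_eq_pred]
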